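-- pv_equiv track=rewrite | github.com/tmncollins/AoC-Solutions | 2016/2016 Day 7.py | tls
-- ===== SOURCE A (Python) =====
-- def abba(s):
--
--     for i in range(len(s)-3):
--         if s[i] == s[i+3] and s[i+1] == s[i+2] and s[i] != s[i+1]:
--             return True
--
--     return False
--
-- def tls(ip):
--     ip = "X" + ip
--     ip = ip.replace("]", "[").split("[")
--
--     valid = False
--     for i in range(len(ip)):
--         if abba(ip[i]):
--             if i % 2 == 0:
--                 valid = True
--             else:
--                 return False
--
--     return valid
-- ===== SOURCE B (Python) =====
-- def tls(ip):
--     outside = inside = False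
--     even = True               # even number of brackets seen so far => supernet
--     n = len(ip)
--     for i, a in enumerate(ip):
--         if a in '[]':
--             even = not even
--         elif i + 3 < n:
--             b, c, d = ip[i+1], ip[i+2], ip[i+3]
--             # a is non-bracket here; b==c and a==d make c,d non-bracket once b is
--             if a == d and b == c and a != b and b not in '[]':
--                 if even:
--                     outside = True
--                 else:
--                     inside = True
--     return outside and not inside
-- ===== Notes on version B (the rewrite author's own statement) =====
-- stated objective: alternative
-- what changed: B never splits the string into segments at all: a single pass over the raw characters toggles an inside/outside parity flag at each bracket and classifies every bracket-free 4-char ABBA window by the flag at its start, replacing A's replace-then-split into segment strings plus a per-segment abba() scan with an indexed loop, valid flag and early return.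
-- intended difference: On inputs that begin with two equal non-bracket characters other than the sentinel letter X, followed by that letter, and that contain no genuine bracket-free ABBA window of their own, the sentinel prefix in A fabricates an ABBA window in the first supernet and A returns True while B returns False; B's value is the intended one since the sentinel exists only to fix parity and must not take part in matching. — e.g. on tls("aaX"): A returns true, B returns false
import Mathlib
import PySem

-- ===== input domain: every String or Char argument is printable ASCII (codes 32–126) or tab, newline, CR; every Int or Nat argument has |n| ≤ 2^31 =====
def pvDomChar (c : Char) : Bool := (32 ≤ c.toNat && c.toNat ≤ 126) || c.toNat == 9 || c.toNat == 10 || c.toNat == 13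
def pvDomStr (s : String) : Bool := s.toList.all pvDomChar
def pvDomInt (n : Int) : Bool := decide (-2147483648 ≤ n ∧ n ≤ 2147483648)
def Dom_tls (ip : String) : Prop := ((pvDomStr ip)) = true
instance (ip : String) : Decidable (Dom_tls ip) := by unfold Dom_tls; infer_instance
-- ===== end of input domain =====

-- B replaces A's replace+split-into-segments with a single sliding-window pass over the raw
-- string: a parity flag toggled at brackets classifies each bracket-free ABBA window.
-- Return value only; A rebinds its local 'ip', no caller-visible mutation.

-- ===== PORT A =====
-- abba: every index taken inside range(len(s)-3) is in bounds, so getD with any default is exact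
def abbaA (s : List Char) : Bool :=
  (List.range (s.length - 3)).any fun i =>
    s.getD i 'X' == s.getD (i+3) 'X' && s.getD (i+1) 'X' == s.getD (i+2) 'X' &&
      !(s.getD i 'X' == s.getD (i+1) 'X')

-- hand port of str.split("[") with a one-character separator (keeps empty pieces), exact
def splitChar (c : Char) : List Char → List (List Char)
  | [] => [[]]
  | a :: rest =>
    if a = c then [] :: splitChar c rest
    else match splitChar c rest with
      | s :: ss => (a :: s) :: ss
      | [] => [[a]]

-- the for-i-in-range loop over the segment list with the running index and the valid flag
def loopA : List (List Char) → Nat → Bool → Bool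
  | [], _, valid => valid
  | s :: rest, i, valid =>
    if abbaA s then
      if i % 2 = 0 then loopA rest (i+1) true else false
    else loopA rest (i+1) valid

def tls (ip : String) : Bool :=
  let ip1 := ("X" ++ ip).toList.map (fun ch => if ch = ']' then '[' else ch)  -- ("X"+ip).replace("]","[")
  loopA (splitChar '[' ip1) 0 false

-- ===== PORT B =====
-- Source B's for i,a in enumerate(ip) with lookahead ip[i+1..i+3] becomes structural recursion on
-- the suffix r; 'i + 3 < n' = 3 ≤ r.length, and the guarded in-bounds indexing is getD (exact)
def loopB : List Char → Bool → Bool → Bool → Bool × Bool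
  | [], _, outs, ins => (outs, ins)
  | a :: r, ev, outs, ins =>
    if a = '[' ∨ a = ']' then loopB r (!ev) outs ins
    else if 3 ≤ r.length then
      let b := r.getD 0 ' '
      let c := r.getD 1 ' '
      let d := r.getD 2 ' '
      if a == d && b == c && !(a == b) && b != '[' && b != ']' then
        if ev then loopB r ev true ins else loopB r ev outs true
      else loopB r ev outs ins
    else loopB r ev outs ins

def tls_alt (ip : String) : Bool :=
  let p := loopB ip.toList true false false
  p.1 && !p.2

-- ===== PRECONDITION & SPEC =====
-- noBr c: c is not a bracket.  winIn l i: the four characters l[i..i+3] exist and form a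
-- bracket-free ABBA window.  hasWin l: such a window occurs somewhere in l.  These only
-- inspect the input string.
def winIn (l : List Char) (i : Nat) : Bool :=
  match l.drop i with
  | a :: b :: c :: d :: _ =>
    decide ('[' ∉ [a, b] ∧ ']' ∉ [a, b] ∧ a = d ∧ b = c ∧ a ≠ b)
  | _ => false

def hasWin (l : List Char) : Bool := (List.range l.length).any (winIn l)

-- On inputs that begin with two equal non-bracket characters other than the sentinel letter X,
-- followed by that letter, and that contain no genuine bracket-free ABBA window of their own,
-- the sentinel prefix in A fabricates an ABBA window in the first supernet and A returns True
-- while B returns False; B's value is the intended one: the sentinel exists only to fix parity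
-- and must not take part in matching.
def D_tls (ip : String) : Prop := winIn ('X' :: ip.toList) 0 ∧ ¬ hasWin ip.toList
instance (ip : String) : Decidable (D_tls ip) := by unfold D_tls; infer_instance

def Spec_tls (ip : String) (out : Bool) : Prop := ¬ D_tls ip → out = tls_alt ip
instance (ip : String) (out : Bool) : Decidable (Spec_tls ip out) := by unfold Spec_tls; infer_instance

def pvDiffWitness_tls : String := "aaX"
def pvDiffWitnessOut_tls : Bool × Bool := (true, false)

-- ===== CLAIM (what is proved, stated in full; the proofs are below) =====
def Claim_unchanged_tls : Prop := ∀ (ip : String), Dom_tls ip → Spec_tls ip (tls ip)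
def Claim_changed_tls : Prop := Dom_tls (pvDiffWitness_tls) ∧ D_tls (pvDiffWitness_tls) ∧ tls (pvDiffWitness_tls) = pvDiffWitnessOut_tls.1 ∧ tls_alt (pvDiffWitness_tls) = pvDiffWitnessOut_tls.2 ∧ pvDiffWitnessOut_tls.1 ≠ pvDiffWitnessOut_tls.2
def Claim_exact_tls : Prop := ∀ (ip : String), Dom_tls ip → D_tls ip → tls ip ≠ tls_alt ip

-- ===== LEMMAS AND PROOFS =====

-- clean recursive characterisation of the ABBA test
def abbaR : List Char → Bool
  | a :: b :: c :: d :: r => (a == d && b == c && !(a == b)) || abbaR (b :: c :: d :: r)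
  | _ => false

theorem abbaA_quad (a b c d : Char) (r : List Char) :
    abbaA (a :: b :: c :: d :: r) = ((a == d && b == c && !(a == b)) || abbaA (b :: c :: d :: r)) := by
  have h1 : (a :: b :: c :: d :: r).length - 3 = ((b :: c :: d :: r).length - 3) + 1 := by simp
  rw [abbaA, abbaA, h1, List.range_succ_eq_map]
  simp [List.any_map, Function.comp_def, Nat.succ_eq_add_one]

theorem abbaA_eq : ∀ s, abbaA s = abbaR s
  | [] => by simp [abbaA, abbaR]
  | [a] => by simp [abbaA, abbaR]
  | [a, b] => by simp [abbaA, abbaR]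
  | [a, b, c] => by simp [abbaA, abbaR]
  | a :: b :: c :: d :: r => by
    rw [abbaA_quad, abbaA_eq (b :: c :: d :: r)]; simp [abbaR]

-- proof-side: noBr c = c is not a bracket; recursive forms of the window predicates,
-- bridged to winIn/hasWin below
def noBr (c : Char) : Bool := decide (c ∉ ['[', ']'])

def win0 (a : Char) : List Char → Bool
  | x :: y :: z :: _ => noBr a && noBr x && a == z && x == y && a != x
  | _ => false

def hasWinR : List Char → Bool
  | c :: r => win0 c r || hasWinR r
  | [] => false

theorem beq_decide (u v : Char) : (u == v) = decide (u = v) := by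
  by_cases h : u = v <;> simp [h]

theorem winIn_zero (c : Char) (r : List Char) : winIn (c :: r) 0 = win0 c r := by
  rcases r with _ | ⟨x, _ | ⟨y, _ | ⟨z, t⟩⟩⟩ <;>
    simp [winIn, win0, noBr, bne, Bool.and_assoc, beq_decide, eq_comm, Bool.and_left_comm]

theorem hasWin_bridge : ∀ l : List Char, hasWin l = hasWinR l
  | [] => by simp [hasWin, hasWinR]
  | c :: r => by
    rw [hasWinR, ← hasWin_bridge r, ← winIn_zero c r]
    show (List.range (r.length + 1)).any (winIn (c :: r)) = _
    rw [List.range_succ_eq_map, List.any_cons, List.any_map]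
    have hcmp : (winIn (c :: r) ∘ Nat.succ) = winIn r := by
      funext i; simp [winIn]
    rw [hcmp]
    simp [hasWin]

-- splitting on both brackets at once
def splitB : List Char → List (List Char)
  | [] => [[]]
  | a :: r =>
    if a = '[' ∨ a = ']' then [] :: splitB r
    else match splitB r with
      | s :: ss => (a :: s) :: ss
      | [] => [[a]]

theorem splitB_ne_nil (l : List Char) : splitB l ≠ [] := by
  cases l with
  | nil => simp [splitB]
  | cons a r =>
    rw [splitB]
    split
    · simp
    · cases h : splitB r <;> simp

theorem splitChar_map (l : List Char) :
    splitChar '[' (l.map (fun ch => if ch = ']' then '[' else ch)) = splitB l := by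
  induction l with
  | nil => rfl
  | cons a r ih =>
    rw [List.map_cons, splitChar, splitB]
    by_cases h : a = '[' ∨ a = ']'
    · have : (if a = ']' then '[' else a) = '[' := by rcases h with h | h <;> simp [h]
      simp [this, h, ih]
    · obtain ⟨h1, h2⟩ := not_or.mp h
      have hm : (if a = ']' then '[' else a) = a := if_neg h2
      rw [hm, if_neg h1, if_neg h, ih]

theorem splitB_head (l : List Char) :
    (splitB l).head? = some (l.takeWhile noBr) := by
  induction l with
  | nil => rfl
  | cons a r ih =>
    rw [splitB, List.takeWhile_cons]
    by_cases h : a = '[' ∨ a = ']'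
    · have : noBr a = false := by rcases h with h | h <;> simp [noBr, h]
      simp [h, this]
    · obtain ⟨h1, h2⟩ := not_or.mp h
      have hb : noBr a = true := by simp [noBr, h1, h2]
      cases hs : splitB r with
      | nil => exact absurd hs (splitB_ne_nil r)
      | cons s ss =>
        rw [hs] at ih
        simp [h1, h2, hb] at ih ⊢
        exact ih

-- every-other-element slice, step-2
def step2 {α : Type} : List α → List α
  | [] => []
  | [a] => [a]
  | a :: _ :: r => a :: step2 r

theorem step2_cons {α : Type} (a : α) (r : List α) :
    step2 (a :: r) = a :: step2 (r.drop 1) := by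
  cases r <;> simp [step2]

theorem loopA_eq (segs : List (List Char)) : ∀ (i : Nat) (valid : Bool),
    (i % 2 = 0 → loopA segs i valid =
      ((valid || (step2 segs).any abbaA) && !((step2 (segs.drop 1)).any abbaA))) ∧
    (i % 2 = 1 → loopA segs i valid =
      ((valid || (step2 (segs.drop 1)).any abbaA) && !((step2 segs).any abbaA))) := by
  induction segs with
  | nil => intro i valid; constructor <;> intro _ <;> simp [loopA, step2]
  | cons s rest ih =>
    intro i valid
    constructor
    · intro hi
      have h1 : (i + 1) % 2 = 1 := by omega
      simp only [loopA]
      by_cases ha : abbaA s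
      · rw [if_pos ha, if_pos hi, ((ih (i + 1) true).2 h1)]
        simp [step2_cons, ha]
      · rw [if_neg ha, ((ih (i + 1) valid).2 h1)]
        simp [step2_cons, ha]
    · intro hi
      have h0 : (i + 1) % 2 = 0 := by omega
      simp only [loopA]
      by_cases ha : abbaA s
      · rw [if_pos ha, if_neg (by omega : ¬ i % 2 = 0)]
        simp [step2_cons, ha]
      · rw [if_neg ha, ((ih (i + 1) valid).1 h0)]
        simp [step2_cons, ha]

-- B side: hw l ev = "some bracket-free ABBA window starts where the parity flag equals true,
-- the flag starting at ev and toggling at brackets"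
def hw : List Char → Bool → Bool
  | [], _ => false
  | a :: r, ev =>
    if a = '[' ∨ a = ']' then hw r (!ev)
    else (win0 a r && ev) || hw r ev

theorem loopB_eq : ∀ (l : List Char) (ev outs ins : Bool),
    loopB l ev outs ins = (outs || hw l ev, ins || hw l (!ev))
  | [], ev, outs, ins => by simp [loopB, hw]
  | a :: r, ev, outs, ins => by
    rw [loopB, hw, hw]
    by_cases h : a = '[' ∨ a = ']'
    · rw [if_pos h, if_pos h, if_pos h, loopB_eq r (!ev) outs ins, Bool.not_not]
    · obtain ⟨h1, h2⟩ := not_or.mp h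
      have hb1 : (a == '[') = false := by simp [h1]
      have hb2 : (a == ']') = false := by simp [h2]
      rw [if_neg h, if_neg h, if_neg h]
      rcases r with _ | ⟨x, _ | ⟨y, _ | ⟨z, t⟩⟩⟩
      · rw [if_neg (by simp), loopB_eq [] ev outs ins]; simp [win0]
      · rw [if_neg (by simp), loopB_eq [x] ev outs ins]; simp [win0]
      · rw [if_neg (by simp), loopB_eq [x, y] ev outs ins]; simp [win0]
      · rw [if_pos (by simp)]
        simp only [List.getD_cons_zero, List.getD_cons_succ]
        have hna : noBr a = true := by simp [noBr, h1, h2]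
        have hnx : noBr x = (x != '[' && x != ']') := by
          by_cases hx1 : x = '[' <;> by_cases hx2 : x = ']' <;> simp [noBr, hx1, hx2]
        have hwin : win0 a (x :: y :: z :: t) =
            (a == z && x == y && !(a == x) && x != '[' && x != ']') := by
          simp only [win0, hna, hnx, bne, Bool.true_and]
          cases a == z <;> cases x == y <;> cases a == x <;>
            cases x == '[' <;> cases x == ']' <;> rfl
        rw [hwin]
        by_cases hc : (a == z && x == y && !(a == x) && x != '[' && x != ']') = true
        · rw [if_pos hc, hc]
          cases ev with
          | true =>
            rw [if_pos rfl, loopB_eq (x :: y :: z :: t) true true ins]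
            simp
          | false =>
            rw [if_neg (by simp), loopB_eq (x :: y :: z :: t) false outs true]
            simp
        · have hc' : (a == z && x == y && !(a == x) && x != '[' && x != ']') = false := by
            simpa using hc
          rw [if_neg hc, hc', loopB_eq (x :: y :: z :: t) ev outs ins]
          simp

theorem hasWinR_cons (a : Char) (r : List Char) : hasWinR (a :: r) = (win0 a r || hasWinR r) := rfl

theorem win0_three (a : Char) (l : List Char) (h : win0 a l = true) :
    3 ≤ (l.takeWhile noBr).length := by
  match l with
  | [] => simp [win0] at h
  | [_] => simp [win0] at h
  | [_, _] => simp [win0] at h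
  | x :: y :: z :: t =>
    simp only [win0, Bool.and_eq_true, beq_iff_eq] at h
    obtain ⟨⟨⟨⟨hna, hnx⟩, haz⟩, hxy⟩, -⟩ := h
    have hny : noBr y = true := hxy ▸ hnx
    have hnz : noBr z = true := haz ▸ hna
    rw [List.takeWhile_cons_of_pos hnx, List.takeWhile_cons_of_pos hny,
      List.takeWhile_cons_of_pos hnz]
    simp

theorem head_seg (a : Char) (l s0 : List Char) (hs0 : s0 = l.takeWhile noBr) :
    abbaR (a :: s0) = (win0 a l || abbaR s0) := by
  match s0, hs0 with
  | [], hs0 =>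
    have hw : win0 a l = false := by
      by_contra hcon
      rw [Bool.not_eq_false] at hcon
      have := win0_three a l hcon
      rw [← hs0] at this; simp at this
    simp [abbaR, hw]
  | [b], hs0 =>
    have hw : win0 a l = false := by
      by_contra hcon
      rw [Bool.not_eq_false] at hcon
      have := win0_three a l hcon
      rw [← hs0] at this; simp at this
    simp [abbaR, hw]
  | [b, c], hs0 =>
    have hw : win0 a l = false := by
      by_contra hcon
      rw [Bool.not_eq_false] at hcon
      have := win0_three a l hcon
      rw [← hs0] at this; simp at this
    simp [abbaR, hw]
  | b :: c :: d :: r, hs0 =>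
    have hb : noBr b = true := List.mem_takeWhile_imp (by rw [← hs0]; simp)
    obtain ⟨t, ht⟩ : (b :: c :: d :: r) <+: l := hs0 ▸ List.takeWhile_prefix _
    have hl : l = b :: c :: d :: (r ++ t) := by rw [← ht]; rfl
    subst hl
    have hd : noBr d = true := List.mem_takeWhile_imp (by rw [← hs0]; simp)
    show ((a == d && b == c && !(a == b)) || abbaR (b :: c :: d :: r)) =
      ((noBr a && noBr b && (a == d) && (b == c) && (a != b)) || abbaR (b :: c :: d :: r))
    by_cases had : a = d
    · have hna : noBr a = true := had ▸ hd
      rw [hna, hb]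
      simp [bne]
    · have : (a == d) = false := by simp [had]
      rw [this]
      simp

-- the window scan with parity equals the per-segment check on alternating segments
theorem hw_eq (l : List Char) : ∀ ev : Bool,
    hw l ev = (if ev then (step2 (splitB l)).any abbaR
               else (step2 ((splitB l).drop 1)).any abbaR) := by
  induction l with
  | nil => intro ev; cases ev <;> simp [hw, splitB, step2, abbaR]
  | cons a r ih =>
    intro ev
    rw [hw, splitB]
    by_cases h : a = '[' ∨ a = ']'
    · rw [if_pos h, if_pos h, ih (!ev)]
      cases ev with
      | true =>
        rw [step2_cons]
        simp [abbaR]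
      | false =>
        simp
    · obtain ⟨s0, ss, hs⟩ : ∃ s0 ss, splitB r = s0 :: ss := by
        cases hss : splitB r with
        | nil => exact absurd hss (splitB_ne_nil _)
        | cons s0 ss => exact ⟨s0, ss, rfl⟩
      have hs0 : s0 = r.takeWhile noBr := by
        have hh := splitB_head r
        rw [hs, List.head?_cons] at hh
        exact Option.some.inj hh
      rw [if_neg h, if_neg h, hs, ih ev]
      cases ev with
      | true =>
        rw [hs, step2_cons, step2_cons, List.any_cons, List.any_cons,
          head_seg a r s0 hs0]
        simp [Bool.or_assoc]
      | false =>
        rw [hs]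
        simp
  
theorem anySplit {α : Type} (p : α → Bool) : ∀ l : List α,
    l.any p = ((step2 l).any p || (step2 (l.drop 1)).any p)
  | [] => by simp [step2]
  | a :: r => by
    rw [List.any_cons, anySplit p r, step2_cons]
    simp only [List.drop_one, List.tail_cons, List.any_cons]
    cases p a <;> cases (step2 r.tail).any p <;> cases (step2 r).any p <;> simp

theorem hasWinR_eq (l : List Char) : hasWinR l = (splitB l).any abbaR := by
  induction l with
  | nil => simp [hasWinR, splitB, abbaR]
  | cons a r ih =>
    rw [hasWinR_cons]
    by_cases ha : noBr a = true
    · have ha' : ¬ (a = '[' ∨ a = ']') := by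
        rintro (h | h) <;> simp [noBr, h] at ha
      obtain ⟨s0, ss, hs⟩ : ∃ s0 ss, splitB r = s0 :: ss := by
        cases h : splitB r with
        | nil => exact absurd h (splitB_ne_nil _)
        | cons s0 ss => exact ⟨s0, ss, rfl⟩
      have hs0 : s0 = r.takeWhile noBr := by
        have h := splitB_head r
        rw [hs, List.head?_cons] at h
        exact Option.some.inj h
      rw [splitB, if_neg ha', hs, List.any_cons, head_seg a r s0 hs0, ih, hs, List.any_cons]
      simp [Bool.or_assoc]
    · have ha' : a = '[' ∨ a = ']' := by
        by_contra hcon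
        obtain ⟨h1, h2⟩ := not_or.mp hcon
        exact ha (by simp [noBr, h1, h2])
      have hna : noBr a = false := by simpa using ha
      have hw : win0 a r = false := by
        match r with
        | [] => rfl
        | [_] => rfl
        | [_, _] => rfl
        | x :: y :: z :: t => simp [win0, hna]
      rw [splitB, if_pos ha', List.any_cons, hw, ih]
      simp [abbaR]

theorem step2_sublist {α : Type} : ∀ l : List α, List.Sublist (step2 l) l
  | [] => List.Sublist.refl _
  | [a] => List.Sublist.refl _
  | a :: b :: r => by
    rw [show step2 (a :: b :: r) = a :: step2 r from rfl]
    exact List.Sublist.cons₂ a ((step2_sublist r).trans (List.sublist_cons_self b r))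

theorem any_false_of_sublist {α : Type} (p : α → Bool) {l l' : List α} (h : List.Sublist l' l)
    (hl : l.any p = false) : l'.any p = false := by
  rw [List.any_eq_false] at hl ⊢
  exact fun x hx => hl x (h.subset hx)

-- the common shape of both ports after rewriting to splitB / abbaR
theorem ports_shape (ip : String) :
    ∀ s0 ss, splitB ip.toList = s0 :: ss →
      tls ip = ((abbaR ('X' :: s0) || (step2 (ss.drop 1)).any abbaR) &&
        !((step2 ss).any abbaR)) ∧
      tls_alt ip = ((abbaR s0 || (step2 (ss.drop 1)).any abbaR) &&
        !((step2 ss).any abbaR)) := by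
  intro s0 ss hs
  have hfa : abbaA = abbaR := funext abbaA_eq
  have hXsplit : splitB ('X' :: ip.toList) = ('X' :: s0) :: ss := by
    rw [splitB, if_neg (by decide), hs]
  constructor
  · show loopA (splitChar '[' (("X" ++ ip).toList.map _)) 0 false = _
    have hXl : ("X" ++ ip).toList = 'X' :: ip.toList := by simp
    rw [hXl, splitChar_map, hXsplit, (loopA_eq _ 0 false).1 rfl, step2_cons, hfa]
    simp
  · show ((loopB ip.toList true false false).1 && !(loopB ip.toList true false false).2) = _
    rw [loopB_eq ip.toList true false false]
    simp only [Bool.false_or, Bool.not_true]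
    rw [hw_eq ip.toList true, hw_eq ip.toList false, hs, step2_cons]
    simp

theorem tls_spec : Claim_unchanged_tls := by
  unfold Claim_unchanged_tls
  intro ip _ hD
  unfold D_tls at hD
  obtain ⟨s0, ss, hs⟩ : ∃ s0 ss, splitB ip.toList = s0 :: ss := by
    cases h : splitB ip.toList with
    | nil => exact absurd h (splitB_ne_nil _)
    | cons s0 ss => exact ⟨s0, ss, rfl⟩
  obtain ⟨hA, hB⟩ := ports_shape ip s0 ss hs
  have hs0 : s0 = ip.toList.takeWhile noBr := by
    have h := splitB_head ip.toList
    rw [hs, List.head?_cons] at h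
    exact Option.some.inj h
  show tls ip = tls_alt ip
  rw [hA, hB, head_seg 'X' ip.toList s0 hs0]
  simp only [List.drop_one]
  by_cases hW : win0 'X' ip.toList = true
  · have hwin : hasWinR ip.toList = true := by
      by_contra hcon
      have hf : hasWinR ip.toList = false := by simpa using hcon
      exact hD ⟨by rw [winIn_zero]; exact hW, by simp [hasWin_bridge, hf]⟩
    have hany : (abbaR s0 || ss.any abbaR) = true := by
      rw [hasWinR_eq, hs, List.any_cons] at hwin
      exact hwin
    by_cases hb0 : abbaR s0 = true
    · simp [hb0]
    · have hb0' : abbaR s0 = false := by simpa using hb0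
      have hss : ss.any abbaR = true := by simpa [hb0'] using hany
      rw [anySplit] at hss
      simp only [List.drop_one] at hss
      by_cases hH : (step2 ss).any abbaR = true
      · simp [hH]
      · have hH' : (step2 ss).any abbaR = false := by simpa using hH
        have hE : (step2 ss.tail).any abbaR = true := by simpa [hH'] using hss
        simp [hE]
  · have hW' : win0 'X' ip.toList = false := by simpa using hW
    rw [hW']
    simp

theorem tls_tight : Claim_exact_tls := by
  unfold Claim_exact_tls
  intro ip _ hD
  unfold D_tls at hD
  obtain ⟨hW', hwin'⟩ := hD
  have hW : win0 'X' ip.toList = true := by rw [← winIn_zero]; exact hW'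
  have hwin : hasWinR ip.toList = false := by
    rw [← hasWin_bridge]
    cases h : hasWin ip.toList
    · rfl
    · exact absurd h hwin'
  obtain ⟨s0, ss, hs⟩ : ∃ s0 ss, splitB ip.toList = s0 :: ss := by
    cases h : splitB ip.toList with
    | nil => exact absurd h (splitB_ne_nil _)
    | cons s0 ss => exact ⟨s0, ss, rfl⟩
  obtain ⟨hA, hB⟩ := ports_shape ip s0 ss hs
  have hs0 : s0 = ip.toList.takeWhile noBr := by
    have h := splitB_head ip.toList
    rw [hs, List.head?_cons] at h
    exact Option.some.inj h
  rw [hasWinR_eq, hs, List.any_cons, Bool.or_eq_false_iff] at hwin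
  have hH : (step2 ss).any abbaR = false :=
    any_false_of_sublist abbaR (step2_sublist ss) hwin.2
  have hE : (step2 ss.tail).any abbaR = false :=
    any_false_of_sublist abbaR ((step2_sublist _).trans (List.tail_sublist ss)) hwin.2
  rw [hA, hB, head_seg 'X' ip.toList s0 hs0, hW, hwin.1]
  simp only [List.drop_one]
  rw [hH, hE]
  simp

theorem tls_changed : Claim_changed_tls := by
  unfold Claim_changed_tls; decide
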